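-- pv_equiv track=rewrite | github.com/tobias-pils/sequence | puzzle.py | has_exactly_one_solution
-- ===== SOURCE A (Python) =====
-- from collections.abc import Generator
--
-- def mandatory_correct(mandatory_rule: str, guess: str) -> bool:
--     if len(mandatory_rule) != 2 or len(guess) < 1:
--         return False
--     if mandatory_rule[0] == "|":
--         return guess[0] == mandatory_rule[1]
--     if mandatory_rule[1] == "|":
--         return guess[-1] == mandatory_rule[0]
--     return mandatory_rule in guess
--
-- def forbidden_correct(forbidden_rule: str, guess: str) -> bool:
--     if len(forbidden_rule) != 2 or len(guess) < 2:
--         return False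
--     if forbidden_rule[0] == "|":
--         return guess[0] != forbidden_rule[1]
--     if forbidden_rule[1] == "|":
--         return guess[-1] != forbidden_rule[0]
--     return forbidden_rule not in guess
--
-- def all_solutions(length: int, sub_solution: str) -> Generator[str]:
--     if len(sub_solution) < length:
--         for i in range(length):
--             if str(i) in sub_solution:
--                 continue
--             for solution in all_solutions(length, sub_solution + str(i)):
--                 yield solution
--     else:
--         yield sub_solution
--
-- def has_exactly_one_solution(length: int, mandatory: list[str], forbidden: list[str]) -> bool:
--     first_solution = None
--     for solution in all_solutions(length, ""):
--         is_correct = True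
--         for rule in mandatory:
--             if not mandatory_correct(rule, solution):
--                 is_correct = False
--                 break
--         if not is_correct:
--             continue
--         for rule in forbidden:
--             if not forbidden_correct(rule, solution):
--                 is_correct = False
--                 break
--         if is_correct:
--             if first_solution == None:
--                 first_solution = solution
--             else:
--                 return False
--     return first_solution != None
-- ===== SOURCE B (Python) =====
-- def has_exactly_one_solution(length: int, mandatory: list[str], forbidden: list[str]) -> bool:
--     # A malformed (non-2-char) rule can never be satisfied, so no candidate passes.
--     if any(len(r) != 2 for r in mandatory) or any(len(r) != 2 for r in forbidden):
--         return False
--     starts_m = [r[1] for r in mandatory if r[0] == "|"]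
--     ends_m = [r[0] for r in mandatory if r[0] != "|" and r[1] == "|"]
--     subs_m = [r for r in mandatory if r[0] != "|" and r[1] != "|"]
--     starts_f = [r[1] for r in forbidden if r[0] == "|"]
--     ends_f = [r[0] for r in forbidden if r[0] != "|" and r[1] == "|"]
--     subs_f = [r for r in forbidden if r[0] != "|" and r[1] != "|"]
--
--     def leaf_ok(p: str) -> bool:
--         if not p:
--             return not mandatory and not forbidden
--         if forbidden and len(p) < 2:
--             return False
--         last = p[-1]
--         return (all(last == c for c in ends_m)
--                 and all(s in p for s in subs_m)
--                 and all(last != c for c in ends_f))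
--
--     def pruned(q: str) -> bool:
--         # Violations that can only get worse as q is extended.
--         return (any(q[0] != c for c in starts_m)
--                 or any(q[0] == c for c in starts_f)
--                 or any(s in q for s in subs_f))
--
--     def count(p: str, cnt: int) -> int:
--         if cnt >= 2:
--             return cnt
--         if len(p) >= length:
--             return cnt + (1 if leaf_ok(p) else 0)
--         for i in range(length):
--             tok = str(i)
--             if tok in p:
--                 continue
--             q = p + tok
--             if pruned(q):
--                 continue
--             cnt = count(q, cnt)
--         return cnt
--
--     return count("", 0) == 1
-- ===== Notes on version B (the rewrite author's own statement) =====
-- stated objective: alternative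
-- what changed: A generates every digit-permutation and filters each complete candidate against all rules afterwards; B classifies the rules once into start/end/substring constraints, does a DFS that prunes any branch whose prefix already violates a monotone constraint (wrong first character, forbidden substring present), checks only the residual end/substring rules at leaves, and stops counting at the second solution.
import Mathlib
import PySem

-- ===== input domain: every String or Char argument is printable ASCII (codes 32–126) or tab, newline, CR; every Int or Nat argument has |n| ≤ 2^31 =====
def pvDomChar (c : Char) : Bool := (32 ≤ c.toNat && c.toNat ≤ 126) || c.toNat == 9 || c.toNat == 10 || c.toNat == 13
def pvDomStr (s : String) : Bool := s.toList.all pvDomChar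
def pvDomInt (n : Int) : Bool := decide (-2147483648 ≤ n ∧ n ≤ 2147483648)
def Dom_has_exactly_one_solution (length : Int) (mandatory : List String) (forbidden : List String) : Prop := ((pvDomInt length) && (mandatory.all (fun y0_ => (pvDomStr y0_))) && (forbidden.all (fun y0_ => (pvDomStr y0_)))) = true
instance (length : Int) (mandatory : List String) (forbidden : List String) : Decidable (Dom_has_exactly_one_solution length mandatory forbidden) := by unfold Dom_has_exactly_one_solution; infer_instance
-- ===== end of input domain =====

-- B replaces A's generate-all-permutations-then-filter scan by a pruned DFS: rules are
-- classified once, branches whose prefix already violates a monotone (start / forbidden-substring)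
-- constraint are cut, and counting stops at the second solution.

-- termination helpers (cited by the ports' decreasing_by)
theorem pv_toDigitsCore_le (b f n : Nat) (acc : List Char) :
    acc.length ≤ (Nat.toDigitsCore b f n acc).length := by
  induction f generalizing n acc with
  | zero => simp [Nat.toDigitsCore]
  | succ f ih =>
    rw [Nat.toDigitsCore]
    split
    · simp
    · exact le_trans (by simp) (ih _ _)

theorem pv_toChars_ne_nil (n : Int) : PySem.Int.toChars n ≠ [] := by
  unfold PySem.Int.toChars
  split
  · simp
  · unfold Nat.toDigits
    intro h
    have h1 : ([] : List Char).length < (Nat.toDigitsCore 10 (n.toNat + 1) n.toNat []).length := by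
      rw [Nat.toDigitsCore]
      split
      · simp
      · exact lt_of_lt_of_le (by simp) (pv_toDigitsCore_le 10 _ _ _)
    rw [h] at h1
    simp at h1

theorem pv_tok_ne_nil (i : Int) : (PySem.Int.toStr i).toList ≠ [] := by
  rw [PySem.Int.toList_toStr]; exact pv_toChars_ne_nil i

theorem pv_measure_lt (length : Int) (p : String) (i : Int)
    (h : PySem.Str.len p < length) :
    (length - PySem.Str.len (p ++ PySem.Int.toStr i)).toNat < (length - PySem.Str.len p).toNat := by
  have h1 : (PySem.Int.toStr i).toList ≠ [] := pv_tok_ne_nil i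
  have h2 : 0 < (PySem.Int.toStr i).toList.length := List.length_pos_iff.mpr h1
  simp only [PySem.Str.len_eq, String.toList_append, List.length_append] at *
  omega

-- ===== PORT A =====
def mandatory_correct (mandatory_rule : String) (guess : String) : Bool :=
  if PySem.Str.len mandatory_rule ≠ 2 ∨ PySem.Str.len guess < 1 then false
  else if PySem.Str.pyGet? mandatory_rule 0 = some '|' then
    decide (PySem.Str.pyGet? guess 0 = PySem.Str.pyGet? mandatory_rule 1)
  else if PySem.Str.pyGet? mandatory_rule 1 = some '|' then
    decide (PySem.Str.pyGet? guess (-1) = PySem.Str.pyGet? mandatory_rule 0)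
  else PySem.Str.isIn mandatory_rule guess

def forbidden_correct (forbidden_rule : String) (guess : String) : Bool :=
  if PySem.Str.len forbidden_rule ≠ 2 ∨ PySem.Str.len guess < 2 then false
  else if PySem.Str.pyGet? forbidden_rule 0 = some '|' then
    decide (PySem.Str.pyGet? guess 0 ≠ PySem.Str.pyGet? forbidden_rule 1)
  else if PySem.Str.pyGet? forbidden_rule 1 = some '|' then
    decide (PySem.Str.pyGet? guess (-1) ≠ PySem.Str.pyGet? forbidden_rule 0)
  else !(PySem.Str.isIn forbidden_rule guess)

def all_solutions (length : Int) (sub_solution : String) : List String :=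
  if h : PySem.Str.len sub_solution < length then
    (PySem.List.pyRange 0 length 1).flatMap (fun i =>
      if PySem.Str.isIn (PySem.Int.toStr i) sub_solution then []
      else all_solutions length (sub_solution ++ PySem.Int.toStr i))
  else [sub_solution]
termination_by (length - PySem.Str.len sub_solution).toNat
decreasing_by exact pv_measure_lt length sub_solution _ h

def hasLoopA (mandatory forbidden : List String) : List String → Option String → Bool
  | [], first_solution => decide (first_solution ≠ none)
  | s :: rest, first_solution =>
    if (mandatory.all fun r => mandatory_correct r s) &&
       (forbidden.all fun r => forbidden_correct r s) then
      match first_solution with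
      | none => hasLoopA mandatory forbidden rest (some s)
      | some _ => false
    else hasLoopA mandatory forbidden rest first_solution

def has_exactly_one_solution (length : Int) (mandatory : List String) (forbidden : List String) : Bool :=
  hasLoopA mandatory forbidden (all_solutions length "") none

-- ===== PORT B =====
def bLeafOk (mandatory forbidden : List String) (endsM : List (Option Char)) (subsM : List String)
    (endsF : List (Option Char)) (p : String) : Bool :=
  if p = "" then mandatory.isEmpty && forbidden.isEmpty
  else if !forbidden.isEmpty && PySem.Str.len p < 2 then false
  else
    (endsM.all fun c => decide (PySem.Str.pyGet? p (-1) = c)) &&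
    (subsM.all fun s => PySem.Str.isIn s p) &&
    (endsF.all fun c => decide (PySem.Str.pyGet? p (-1) ≠ c))

def bPruned (startsM startsF : List (Option Char)) (subsF : List String) (q : String) : Bool :=
  (startsM.any fun c => decide (PySem.Str.pyGet? q 0 ≠ c)) ||
  (startsF.any fun c => decide (PySem.Str.pyGet? q 0 = c)) ||
  (subsF.any fun s => PySem.Str.isIn s q)

def bCount (length : Int) (mandatory forbidden : List String)
    (startsM endsM : List (Option Char)) (subsM : List String)
    (startsF endsF : List (Option Char)) (subsF : List String)
    (p : String) (cnt : Int) : Int :=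
  if cnt ≥ 2 then cnt
  else if PySem.Str.len p ≥ length then
    cnt + (if bLeafOk mandatory forbidden endsM subsM endsF p then 1 else 0)
  else
    (PySem.List.pyRange 0 length 1).foldl (fun c i =>
      if PySem.Str.isIn (PySem.Int.toStr i) p then c
      else if bPruned startsM startsF subsF (p ++ PySem.Int.toStr i) then c
      else bCount length mandatory forbidden startsM endsM subsM startsF endsF subsF
            (p ++ PySem.Int.toStr i) c) cnt
termination_by (length - PySem.Str.len p).toNat
decreasing_by exact pv_measure_lt length p _ (by omega)

def has_exactly_one_solution_alt (length : Int) (mandatory : List String) (forbidden : List String) : Bool :=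
  if (mandatory.any fun r => decide (PySem.Str.len r ≠ 2)) ||
     (forbidden.any fun r => decide (PySem.Str.len r ≠ 2)) then false
  else
    let startsM := (mandatory.filter fun r => decide (PySem.Str.pyGet? r 0 = some '|')).map
      (fun r => PySem.Str.pyGet? r 1)
    let endsM := (mandatory.filter fun r =>
      decide (PySem.Str.pyGet? r 0 ≠ some '|') && decide (PySem.Str.pyGet? r 1 = some '|')).map
      (fun r => PySem.Str.pyGet? r 0)
    let subsM := mandatory.filter fun r =>
      decide (PySem.Str.pyGet? r 0 ≠ some '|') && decide (PySem.Str.pyGet? r 1 ≠ some '|')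
    let startsF := (forbidden.filter fun r => decide (PySem.Str.pyGet? r 0 = some '|')).map
      (fun r => PySem.Str.pyGet? r 1)
    let endsF := (forbidden.filter fun r =>
      decide (PySem.Str.pyGet? r 0 ≠ some '|') && decide (PySem.Str.pyGet? r 1 = some '|')).map
      (fun r => PySem.Str.pyGet? r 0)
    let subsF := forbidden.filter fun r =>
      decide (PySem.Str.pyGet? r 0 ≠ some '|') && decide (PySem.Str.pyGet? r 1 ≠ some '|')
    decide (bCount length mandatory forbidden startsM endsM subsM startsF endsF subsF "" 0 = 1)

-- ===== PRECONDITION & SPEC =====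
def Spec_has_exactly_one_solution (length : Int) (mandatory : List String) (forbidden : List String) (out : Bool) : Prop := out = has_exactly_one_solution_alt length mandatory forbidden
instance (length : Int) (mandatory : List String) (forbidden : List String) (out : Bool) : Decidable (Spec_has_exactly_one_solution length mandatory forbidden out) := by unfold Spec_has_exactly_one_solution; infer_instance

-- ===== CLAIM (what is proved, stated in full; the proofs are below) =====
def Claim_equal_has_exactly_one_solution : Prop := ∀ (length : Int) (mandatory : List String) (forbidden : List String), Dom_has_exactly_one_solution length mandatory forbidden → Spec_has_exactly_one_solution length mandatory forbidden (has_exactly_one_solution length mandatory forbidden)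

-- ===== LEMMAS AND PROOFS =====

def okA (md fb : List String) (s : String) : Bool :=
  (md.all fun r => mandatory_correct r s) && (fb.all fun r => forbidden_correct r s)

theorem loopA_some (md fb : List String) (l : List String) (x : String) :
    hasLoopA md fb l (some x) = decide (l.countP (okA md fb) = 0) := by
  induction l with
  | nil => simp [hasLoopA]
  | cons s rest ih =>
    rw [hasLoopA]
    by_cases h : okA md fb s = true
    · rw [if_pos (by simpa [okA] using h)]
      simp [List.countP_cons, h]
    · rw [if_neg (by simpa [okA] using h)]
      simp [List.countP_cons, h, ih]

theorem loopA_none (md fb : List String) (l : List String) :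
    hasLoopA md fb l none = decide (l.countP (okA md fb) = 1) := by
  induction l with
  | nil => simp [hasLoopA]
  | cons s rest ih =>
    rw [hasLoopA]
    by_cases h : okA md fb s = true
    · rw [if_pos (by simpa [okA] using h)]
      simp [List.countP_cons, h, loopA_some]
    · rw [if_neg (by simpa [okA] using h)]
      simp [List.countP_cons, h, ih]

theorem pv_ne_empty_iff (p : String) : p ≠ "" ↔ p.toList ≠ [] := by
  constructor
  · intro h hl; exact h (by ext1; simp [hl])
  · intro h hp; exact h (by simp [hp])

theorem pv_len_pos (p : String) (hp : p ≠ "") : 0 < p.length := by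
  rcases Nat.eq_zero_or_pos p.length with h0 | h1
  · exact absurd (String.ext
      (by simpa [List.length_eq_zero_iff, String.length_toList] using h0 : p.toList = [])) hp
  · exact h1

theorem pv_strLen_eq (p : String) : PySem.Str.len p = (p.length : Int) := by
  rw [PySem.Str.len_eq, String.length_toList]

theorem pv_get0_append (q t : String) (hq : q ≠ "") :
    PySem.Str.pyGet? (q ++ t) 0 = PySem.Str.pyGet? q 0 := by
  have hl : q.toList ≠ [] := (pv_ne_empty_iff q).mp hq
  obtain ⟨a, s, hqd⟩ := List.exists_cons_of_ne_nil hl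
  simp only [PySem.Str.pyGet?_eq, PySem.Chars.pyGet?_eq_listPyGet?, String.toList_append,
    PySem.List.pyGet?_zero, hqd]
  simp

theorem pv_isIn_append (sub q t : String) (h : PySem.Str.isIn sub q = true) :
    PySem.Str.isIn sub (q ++ t) = true := by
  rw [PySem.Str.isIn_iff_infix] at h ⊢
  rw [String.toList_append]
  exact List.infix_append_of_infix_left h

theorem mem_all_solutions_extends (length : Int) :
    ∀ (n : Nat) (p s : String), (length - PySem.Str.len p).toNat ≤ n →
      s ∈ all_solutions length p → ∃ t, s = p ++ t := by
  intro n
  induction n with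
  | zero =>
    intro p s hm hs
    rw [all_solutions.eq_def, dif_neg (by simp [PySem.Str.len_eq] at hm ⊢; omega)] at hs
    simp at hs
    exact ⟨"", by simp [hs]⟩
  | succ n ih =>
    intro p s hm hs
    rw [all_solutions.eq_def] at hs
    split at hs
    · rename_i hlt
      simp only [List.mem_flatMap] at hs
      obtain ⟨i, _, hs⟩ := hs
      split at hs
      · simp at hs
      · obtain ⟨t, ht⟩ := ih (p ++ PySem.Int.toStr i) s
          (by have := pv_measure_lt length p i hlt; omega) hs
        exact ⟨PySem.Int.toStr i ++ t, by rw [ht, String.append_assoc]⟩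
    · simp at hs
      exact ⟨"", by simp [hs]⟩

-- membership characterizations of the six classified lists (as produced in has_exactly_one_solution_alt)
theorem pruned_sound (length : Int) (md fb : List String)
    (sM sF : List (Option Char)) (uF : List String)
    (hsM : ∀ c ∈ sM, ∃ r ∈ md, PySem.Str.pyGet? r 0 = some '|' ∧ c = PySem.Str.pyGet? r 1)
    (hsF : ∀ c ∈ sF, ∃ r ∈ fb, PySem.Str.pyGet? r 0 = some '|' ∧ c = PySem.Str.pyGet? r 1)
    (huF : ∀ u ∈ uF, ∃ r ∈ fb, PySem.Str.pyGet? r 0 ≠ some '|' ∧ PySem.Str.pyGet? r 1 ≠ some '|' ∧ u = r)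
    (h2m : ∀ r ∈ md, PySem.Str.len r = 2) (h2f : ∀ r ∈ fb, PySem.Str.len r = 2)
    (q : String) (hq : q ≠ "")
    (hp : bPruned sM sF uF q = true) :
    ∀ s ∈ all_solutions length q, okA md fb s = false := by
  intro s hs
  obtain ⟨t, hst⟩ := mem_all_solutions_extends length (length - PySem.Str.len q).toNat q s le_rfl hs
  have hslen : PySem.Str.len s = (s.length : Int) := pv_strLen_eq s
  have hslen1 : 1 ≤ s.length := by
    rw [hst, String.length_append]
    have := pv_len_pos q hq
    omega
  have hs0 : PySem.Str.pyGet? s 0 = PySem.Str.pyGet? q 0 := by rw [hst]; exact pv_get0_append q t hq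
  simp only [bPruned, Bool.or_eq_true, List.any_eq_true, decide_eq_true_eq] at hp
  rcases hp with (⟨c, hc, hne⟩ | ⟨c, hc, heq⟩) | ⟨u, hu, hin⟩
  · -- a mandatory start rule is violated on q, hence on s
    obtain ⟨r, hr, hr0, hc1⟩ := hsM c hc
    have : mandatory_correct r s = false := by
      rw [mandatory_correct, if_neg (by have := h2m r hr; rw [hslen]; omega),
        if_pos hr0]
      have hx : ¬ (PySem.Str.pyGet? s 0 = PySem.Str.pyGet? r 1) := by rw [hs0, ← hc1]; exact hne
      simpa using hx
    simp only [okA, Bool.and_eq_false_iff, List.all_eq_false]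
    exact Or.inl ⟨r, hr, by simp [this]⟩
  · obtain ⟨r, hr, hr0, hc1⟩ := hsF c hc
    have : forbidden_correct r s = false := by
      by_cases h2 : PySem.Str.len s < 2
      · rw [forbidden_correct, if_pos (Or.inr h2)]
      · rw [forbidden_correct, if_neg (by have := h2f r hr; rw [hslen]; omega), if_pos hr0]
        have hx : PySem.Str.pyGet? s 0 = PySem.Str.pyGet? r 1 := by rw [hs0, heq, hc1]
        simpa using hx
    simp only [okA, Bool.and_eq_false_iff, List.all_eq_false]
    exact Or.inr ⟨r, hr, by simp [this]⟩
  · obtain ⟨r, hr, hr0, hr1, hur⟩ := huF u hu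
    have hins : PySem.Str.isIn r s = true := by
      rw [hst]; exact pv_isIn_append r q t (hur ▸ hin)
    have : forbidden_correct r s = false := by
      by_cases h2 : PySem.Str.len s < 2
      · rw [forbidden_correct, if_pos (Or.inr h2)]
      · rw [forbidden_correct, if_neg (by have := h2f r hr; rw [hslen]; omega), if_neg hr0, if_neg hr1]
        simpa using hins
    simp only [okA, Bool.and_eq_false_iff, List.all_eq_false]
    exact Or.inr ⟨r, hr, by simp [this]⟩

theorem leaf_ok_eq (md fb : List String)
    (sM eM : List (Option Char)) (uM : List String) (sF eF : List (Option Char)) (uF : List String)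
    (hsM : ∀ r ∈ md, PySem.Str.pyGet? r 0 = some '|' → PySem.Str.pyGet? r 1 ∈ sM)
    (heM : ∀ c, c ∈ eM ↔ ∃ r ∈ md, PySem.Str.pyGet? r 0 ≠ some '|' ∧ PySem.Str.pyGet? r 1 = some '|' ∧ c = PySem.Str.pyGet? r 0)
    (huM : ∀ u, u ∈ uM ↔ ∃ r ∈ md, PySem.Str.pyGet? r 0 ≠ some '|' ∧ PySem.Str.pyGet? r 1 ≠ some '|' ∧ u = r)
    (hsF : ∀ r ∈ fb, PySem.Str.pyGet? r 0 = some '|' → PySem.Str.pyGet? r 1 ∈ sF)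
    (heF : ∀ c, c ∈ eF ↔ ∃ r ∈ fb, PySem.Str.pyGet? r 0 ≠ some '|' ∧ PySem.Str.pyGet? r 1 = some '|' ∧ c = PySem.Str.pyGet? r 0)
    (huF : ∀ u, u ∈ uF ↔ ∃ r ∈ fb, PySem.Str.pyGet? r 0 ≠ some '|' ∧ PySem.Str.pyGet? r 1 ≠ some '|' ∧ u = r)
    (h2m : ∀ r ∈ md, PySem.Str.len r = 2) (h2f : ∀ r ∈ fb, PySem.Str.len r = 2)
    (p : String) (hsafe : p = "" ∨ bPruned sM sF uF p = false) :
    okA md fb p = bLeafOk md fb eM uM eF p := by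
  by_cases hp : p = ""
  · subst hp
    have hmc : ∀ r, mandatory_correct r "" = false := by
      intro r; rw [mandatory_correct, if_pos]; right; simp [pv_strLen_eq]
    have hfc : ∀ r, forbidden_correct r "" = false := by
      intro r; rw [forbidden_correct, if_pos]; right; simp [PySem.Str.len_eq]
    cases md <;> cases fb <;> simp [okA, bLeafOk, hmc, hfc]
  · have hpr : bPruned sM sF uF p = false := hsafe.resolve_left hp
    have hplen : 0 < p.length := pv_len_pos p hp
    have hplen' : PySem.Str.len p = (p.length : Int) := pv_strLen_eq p
    simp only [bPruned, Bool.or_eq_false_iff, List.any_eq_false, decide_eq_true_eq,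
      not_not] at hpr
    obtain ⟨⟨hstM, hstF⟩, hsubF⟩ := hpr
    rw [bLeafOk, if_neg hp]
    by_cases hl2 : fb ≠ [] ∧ p.length < 2
    · obtain ⟨hfbne, hlen2⟩ := hl2
      obtain ⟨r, fb', rfl⟩ : ∃ r fb', fb = r :: fb' := by
        rcases fb with _ | ⟨r, fb'⟩
        · exact absurd rfl hfbne
        · exact ⟨r, fb', rfl⟩
      rw [if_pos (by
        simp only [List.isEmpty_cons, Bool.not_false, Bool.true_and, decide_eq_true_eq, hplen']
        exact_mod_cast hlen2)]
      have : forbidden_correct r p = false := by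
        rw [forbidden_correct, if_pos]; right; rw [hplen']; exact_mod_cast hlen2
      simp [okA, this]
    · rw [if_neg (by
        rcases fb with _ | ⟨r, fb'⟩
        · simp
        · have hlt : ¬ p.length < 2 := fun h => hl2 ⟨by simp, h⟩
          simp only [List.isEmpty_cons, Bool.not_false, Bool.true_and, decide_eq_true_eq, hplen']
          omega)]
      have hge2 : fb ≠ [] → 2 ≤ p.length := by
        intro h; by_contra hcon; exact hl2 ⟨h, by omega⟩
      rw [Bool.eq_iff_iff]
      simp only [okA, Bool.and_eq_true, List.all_eq_true, decide_eq_true_eq]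
      constructor
      · rintro ⟨hm, hf⟩
        refine ⟨⟨?_, ?_⟩, ?_⟩
        · intro c hc
          obtain ⟨r, hr, hr0, hr1, hc1⟩ := (heM c).mp hc
          have hx := hm r hr
          rw [mandatory_correct, if_neg (by have := h2m r hr; rw [hplen']; omega),
            if_neg hr0, if_pos hr1] at hx
          rw [hc1]
          exact of_decide_eq_true hx
        · intro u hu
          obtain ⟨r, hr, hr0, hr1, hur⟩ := (huM u).mp hu
          have hx := hm r hr
          rw [mandatory_correct, if_neg (by have := h2m r hr; rw [hplen']; omega),
            if_neg hr0, if_neg hr1] at hx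
          rw [hur]
          exact hx
        · intro c hc
          obtain ⟨r, hr, hr0, hr1, hc1⟩ := (heF c).mp hc
          have hx := hf r hr
          rw [forbidden_correct, if_neg (by
              have := h2f r hr
              have := hge2 (List.ne_nil_of_mem hr)
              rw [hplen']; omega),
            if_neg hr0, if_pos hr1] at hx
          rw [hc1]
          exact of_decide_eq_true hx
      · rintro ⟨⟨hEnds, hSubs⟩, hEndsF⟩
        constructor
        · intro r hr
          rw [mandatory_correct, if_neg (by have := h2m r hr; rw [hplen']; omega)]
          by_cases h0 : PySem.Str.pyGet? r 0 = some '|'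
          · rw [if_pos h0]
            exact decide_eq_true (hstM _ (hsM r hr h0))
          · rw [if_neg h0]
            by_cases h1 : PySem.Str.pyGet? r 1 = some '|'
            · rw [if_pos h1]
              exact decide_eq_true (hEnds _ ((heM (PySem.Str.pyGet? r 0)).mpr ⟨r, hr, h0, h1, rfl⟩))
            · rw [if_neg h1]
              exact hSubs r ((huM r).mpr ⟨r, hr, h0, h1, rfl⟩)
        · intro r hr
          rw [forbidden_correct, if_neg (by
              have := h2f r hr
              have := hge2 (List.ne_nil_of_mem hr)
              rw [hplen']; omega)]
          by_cases h0 : PySem.Str.pyGet? r 0 = some '|'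
          · rw [if_pos h0]
            exact decide_eq_true (hstF _ (hsF r hr h0))
          · rw [if_neg h0]
            by_cases h1 : PySem.Str.pyGet? r 1 = some '|'
            · rw [if_pos h1]
              exact decide_eq_true (hEndsF _ ((heF (PySem.Str.pyGet? r 0)).mpr ⟨r, hr, h0, h1, rfl⟩))
            · rw [if_neg h1]
              have hx := hsubF r ((huF r).mpr ⟨r, hr, h0, h1, rfl⟩)
              simp only [Bool.not_eq_true] at hx
              simpa using hx

theorem pv_countP_flatMap (l : List Int) (f : Int → List String) (pred : String → Bool) :
    (((l.flatMap f).countP pred : Nat) : Int) = (l.map (fun i => ((f i).countP pred : Int))).sum := by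
  induction l with
  | nil => simp
  | cons a l ih => simp [List.flatMap_cons, List.countP_append, ih]

theorem pv_foldl_min2 (l : List Int) (k : Int → Int) (step : Int → Int → Int)
    (hk : ∀ i ∈ l, 0 ≤ k i)
    (hstep : ∀ c, ∀ i ∈ l, 0 ≤ c → c ≤ 2 → step c i = min (c + k i) 2) :
    ∀ cnt, 0 ≤ cnt → cnt ≤ 2 → l.foldl step cnt = min (cnt + (l.map k).sum) 2 := by
  induction l with
  | nil => intro cnt h0 h2; simp; omega
  | cons i l ih =>
    intro cnt h0 h2
    have hsum : 0 ≤ (l.map k).sum := by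
      apply List.sum_nonneg
      intro x hx
      simp only [List.mem_map] at hx
      obtain ⟨i', hi', rfl⟩ := hx
      exact hk i' (by simp [hi'])
    have hki : 0 ≤ k i := hk i (by simp)
    rw [List.foldl_cons, hstep cnt i (by simp) h0 h2,
      ih (fun j hj => hk j (by simp [hj])) (fun c j hj => hstep c j (by simp [hj])) _
        (by omega) (by omega)]
    simp only [List.map_cons, List.sum_cons]
    omega

theorem bCount_eq (length : Int) (md fb : List String)
    (sM eM : List (Option Char)) (uM : List String) (sF eF : List (Option Char)) (uF : List String)
    (hsM : ∀ c ∈ sM, ∃ r ∈ md, PySem.Str.pyGet? r 0 = some '|' ∧ c = PySem.Str.pyGet? r 1)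
    (hsM' : ∀ r ∈ md, PySem.Str.pyGet? r 0 = some '|' → PySem.Str.pyGet? r 1 ∈ sM)
    (heM : ∀ c, c ∈ eM ↔ ∃ r ∈ md, PySem.Str.pyGet? r 0 ≠ some '|' ∧ PySem.Str.pyGet? r 1 = some '|' ∧ c = PySem.Str.pyGet? r 0)
    (huM : ∀ u, u ∈ uM ↔ ∃ r ∈ md, PySem.Str.pyGet? r 0 ≠ some '|' ∧ PySem.Str.pyGet? r 1 ≠ some '|' ∧ u = r)
    (hsF : ∀ c ∈ sF, ∃ r ∈ fb, PySem.Str.pyGet? r 0 = some '|' ∧ c = PySem.Str.pyGet? r 1)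
    (hsF' : ∀ r ∈ fb, PySem.Str.pyGet? r 0 = some '|' → PySem.Str.pyGet? r 1 ∈ sF)
    (heF : ∀ c, c ∈ eF ↔ ∃ r ∈ fb, PySem.Str.pyGet? r 0 ≠ some '|' ∧ PySem.Str.pyGet? r 1 = some '|' ∧ c = PySem.Str.pyGet? r 0)
    (huF : ∀ u, u ∈ uF ↔ ∃ r ∈ fb, PySem.Str.pyGet? r 0 ≠ some '|' ∧ PySem.Str.pyGet? r 1 ≠ some '|' ∧ u = r)
    (h2m : ∀ r ∈ md, PySem.Str.len r = 2) (h2f : ∀ r ∈ fb, PySem.Str.len r = 2) :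
    ∀ (n : Nat) (p : String) (cnt : Int), (length - PySem.Str.len p).toNat ≤ n →
      (p = "" ∨ bPruned sM sF uF p = false) → 0 ≤ cnt → cnt ≤ 2 →
      bCount length md fb sM eM uM sF eF uF p cnt =
        min (cnt + ((all_solutions length p).countP (okA md fb) : Int)) 2 := by
  have leafCase : ∀ (p : String) (cnt : Int), PySem.Str.len p ≥ length →
      (p = "" ∨ bPruned sM sF uF p = false) → 0 ≤ cnt → cnt ≤ 2 →
      bCount length md fb sM eM uM sF eF uF p cnt =
        min (cnt + ((all_solutions length p).countP (okA md fb) : Int)) 2 := by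
    intro p cnt hge hsafe h0 h2
    rw [bCount.eq_def]
    have hsol : all_solutions length p = [p] := by
      rw [all_solutions.eq_def, dif_neg (by omega)]
    by_cases hc : cnt ≥ 2
    · rw [if_pos hc]
      have hN : (0:Int) ≤ ((all_solutions length p).countP (okA md fb) : Int) :=
        Int.natCast_nonneg _
      omega
    · rw [if_neg hc, if_pos hge]
      rw [hsol, ← leaf_ok_eq md fb sM eM uM sF eF uF hsM' heM huM hsF' heF huF h2m h2f p hsafe]
      by_cases hok : okA md fb p = true
      · simp only [List.countP_cons, List.countP_nil, hok, if_pos]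
        simp
        omega
      · simp only [List.countP_cons, List.countP_nil, hok]
        simp
        omega
  intro n
  induction n with
  | zero =>
    intro p cnt hm hsafe h0 h2
    exact leafCase p cnt (by omega) hsafe h0 h2
  | succ n ih =>
    intro p cnt hm hsafe h0 h2
    by_cases hge : PySem.Str.len p ≥ length
    · exact leafCase p cnt hge hsafe h0 h2
    · rw [bCount.eq_def]
      by_cases hc : cnt ≥ 2
      · rw [if_pos hc]
        have hN : (0:Int) ≤ ((all_solutions length p).countP (okA md fb) : Int) :=
          Int.natCast_nonneg _
        omega
      · rw [if_neg hc, if_neg hge]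
        rw [all_solutions.eq_def, dif_pos (by omega)]
        have hcount : (((PySem.List.pyRange 0 length 1).flatMap (fun i =>
              if PySem.Str.isIn (PySem.Int.toStr i) p then []
              else all_solutions length (p ++ PySem.Int.toStr i))).countP (okA md fb) : Int) =
            ((PySem.List.pyRange 0 length 1).map (fun i =>
              if PySem.Str.isIn (PySem.Int.toStr i) p then (0:Int)
              else ((all_solutions length (p ++ PySem.Int.toStr i)).countP (okA md fb) : Int))).sum := by
          rw [pv_countP_flatMap]
          apply congrArg
          apply List.map_eq_map_iff.mpr
          intro i _
          split
          · simp
          · rfl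
        rw [hcount]
        apply pv_foldl_min2 _ _ _ _ _ cnt h0 (by omega)
        · intro i _
          split
          · exact le_refl 0
          · exact Int.natCast_nonneg _
        · intro c i hi hc0 hc2
          by_cases hin : PySem.Str.isIn (PySem.Int.toStr i) p = true
          · rw [if_pos hin, if_pos hin]
            omega
          · rw [if_neg hin, if_neg hin]
            have hqne : p ++ PySem.Int.toStr i ≠ "" := by
              rw [pv_ne_empty_iff, String.toList_append]
              have := pv_tok_ne_nil i
              intro hx
              simp only [List.append_eq_nil_iff] at hx
              exact this hx.2
            by_cases hpr : bPruned sM sF uF (p ++ PySem.Int.toStr i) = true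
            · rw [if_pos hpr]
              have hzero : (all_solutions length (p ++ PySem.Int.toStr i)).countP (okA md fb) = 0 := by
                apply List.countP_eq_zero.mpr
                intro s hs
                have := pruned_sound length md fb sM sF uF hsM hsF
                  (fun u hu => (huF u).mp hu) h2m h2f _ hqne hpr s hs
                simp [this]
              rw [hzero]
              simp only [Nat.cast_zero]
              omega
            · rw [if_neg hpr]
              exact ih (p ++ PySem.Int.toStr i) c
                (by have := pv_measure_lt length p i (by omega); omega)
                (Or.inr (by simpa using hpr)) hc0 hc2

-- ===== VERDICT (by name: the statement is the Claim_ definition above) =====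
theorem has_exactly_one_solution_spec : Claim_equal_has_exactly_one_solution := by
  intro length md fb _
  unfold Spec_has_exactly_one_solution
  rw [has_exactly_one_solution, loopA_none]
  simp only [has_exactly_one_solution_alt]
  by_cases hbad : ((md.any fun r => decide (PySem.Str.len r ≠ 2)) ||
      (fb.any fun r => decide (PySem.Str.len r ≠ 2))) = true
  · rw [if_pos hbad]
    have hall : ∀ s, okA md fb s = false := by
      intro s
      simp only [List.any_eq_true, Bool.or_eq_true, decide_eq_true_eq] at hbad
      simp only [okA, Bool.and_eq_false_iff, List.all_eq_false]
      rcases hbad with ⟨r, hr, hlen⟩ | ⟨r, hr, hlen⟩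
      · have hx : mandatory_correct r s = false := by
          rw [mandatory_correct, if_pos (Or.inl hlen)]
        exact Or.inl ⟨r, hr, by simp [hx]⟩
      · have hx : forbidden_correct r s = false := by
          rw [forbidden_correct, if_pos (Or.inl hlen)]
        exact Or.inr ⟨r, hr, by simp [hx]⟩
    have hzero : (all_solutions length "").countP (okA md fb) = 0 :=
      List.countP_eq_zero.mpr (fun s _ => by simp [hall s])
    simp [hzero]
  · rw [if_neg hbad]
    simp only [List.any_eq_true, Bool.or_eq_true, decide_eq_true_eq, not_or, not_exists,
      not_and, not_not] at hbad
    obtain ⟨h2m, h2f⟩ := hbad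
    have key := bCount_eq length md fb
      ((md.filter fun r => decide (PySem.Str.pyGet? r 0 = some '|')).map
        (fun r => PySem.Str.pyGet? r 1))
      ((md.filter fun r =>
        decide (PySem.Str.pyGet? r 0 ≠ some '|') && decide (PySem.Str.pyGet? r 1 = some '|')).map
        (fun r => PySem.Str.pyGet? r 0))
      (md.filter fun r =>
        decide (PySem.Str.pyGet? r 0 ≠ some '|') && decide (PySem.Str.pyGet? r 1 ≠ some '|'))
      ((fb.filter fun r => decide (PySem.Str.pyGet? r 0 = some '|')).map
        (fun r => PySem.Str.pyGet? r 1))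
      ((fb.filter fun r =>
        decide (PySem.Str.pyGet? r 0 ≠ some '|') && decide (PySem.Str.pyGet? r 1 = some '|')).map
        (fun r => PySem.Str.pyGet? r 0))
      (fb.filter fun r =>
        decide (PySem.Str.pyGet? r 0 ≠ some '|') && decide (PySem.Str.pyGet? r 1 ≠ some '|'))
      (by
        intro c hc
        simp only [List.mem_map, List.mem_filter, decide_eq_true_eq] at hc
        obtain ⟨r, ⟨hr, h0⟩, rfl⟩ := hc
        exact ⟨r, hr, h0, rfl⟩)
      (by
        intro r hr h0
        simp only [List.mem_map, List.mem_filter, decide_eq_true_eq]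
        exact ⟨r, ⟨hr, h0⟩, rfl⟩)
      (by
        intro c
        constructor
        · intro hc
          simp only [List.mem_map, List.mem_filter, Bool.and_eq_true, decide_eq_true_eq] at hc
          obtain ⟨r, ⟨hr, h0, h1⟩, hcr⟩ := hc
          exact ⟨r, hr, h0, h1, hcr.symm⟩
        · rintro ⟨r, hr, h0, h1, hcr⟩
          simp only [List.mem_map, List.mem_filter, Bool.and_eq_true, decide_eq_true_eq]
          exact ⟨r, ⟨hr, h0, h1⟩, hcr.symm⟩)
      (by
        intro u
        constructor
        · intro hu
          simp only [List.mem_filter, Bool.and_eq_true, decide_eq_true_eq] at hu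
          exact ⟨u, hu.1, hu.2.1, hu.2.2, rfl⟩
        · rintro ⟨r, hr, h0, h1, rfl⟩
          simp only [List.mem_filter, Bool.and_eq_true, decide_eq_true_eq]
          exact ⟨hr, h0, h1⟩)
      (by
        intro c hc
        simp only [List.mem_map, List.mem_filter, decide_eq_true_eq] at hc
        obtain ⟨r, ⟨hr, h0⟩, rfl⟩ := hc
        exact ⟨r, hr, h0, rfl⟩)
      (by
        intro r hr h0
        simp only [List.mem_map, List.mem_filter, decide_eq_true_eq]
        exact ⟨r, ⟨hr, h0⟩, rfl⟩)
      (by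
        intro c
        constructor
        · intro hc
          simp only [List.mem_map, List.mem_filter, Bool.and_eq_true, decide_eq_true_eq] at hc
          obtain ⟨r, ⟨hr, h0, h1⟩, hcr⟩ := hc
          exact ⟨r, hr, h0, h1, hcr.symm⟩
        · rintro ⟨r, hr, h0, h1, hcr⟩
          simp only [List.mem_map, List.mem_filter, Bool.and_eq_true, decide_eq_true_eq]
          exact ⟨r, ⟨hr, h0, h1⟩, hcr.symm⟩)
      (by
        intro u
        constructor
        · intro hu
          simp only [List.mem_filter, Bool.and_eq_true, decide_eq_true_eq] at hu
          exact ⟨u, hu.1, hu.2.1, hu.2.2, rfl⟩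
        · rintro ⟨r, hr, h0, h1, rfl⟩
          simp only [List.mem_filter, Bool.and_eq_true, decide_eq_true_eq]
          exact ⟨hr, h0, h1⟩)
      h2m h2f
      (length - PySem.Str.len "").toNat "" 0 le_rfl (Or.inl rfl) le_rfl (by omega)
    rw [key]
    exact (decide_eq_decide.mpr (by omega)).symm
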